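-- pv_equiv track=rewrite | github.com/MinjuJangg/Table_recognition | modules.py | wrong_columns
-- ===== SOURCE A (Python) =====
-- def wrong_columns(pred_bboxes, len_colls):
--     all_bbox_cols=[]
--     count = 0
--     for later_bbox, front_bbox in zip(pred_bboxes, [[0,0,0,0]]+pred_bboxes):
--         if front_bbox[2] > later_bbox[0]:
--             all_bbox_cols.append(count)
--             count = 0
--         if len(all_bbox_cols) == len(len_colls):
--             break
--         else:
--             count += 1
--     return all_bbox_cols
-- ===== SOURCE B (Python) =====
-- def wrong_columns(pred_bboxes, len_colls):
--     positions = []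
--     prev_box = [0, 0, 0, 0]
--     for i, box in enumerate(pred_bboxes):
--         if prev_box[2] > box[0]:
--             positions.append(i)
--         prev_box = box
--     gaps = []
--     prev = 0
--     for p in positions[:len(len_colls)]:
--         gaps.append(p - prev)
--         prev = p
--     return gaps
-- ===== Notes on version B (the rewrite author's own statement) =====
-- stated objective: alternative
-- what changed: B replaces A's single stateful loop (running counter, reset-on-append, mid-loop break) by three plain phases: collect the overlap positions, truncate to len(len_colls), and emit successive differences.
-- intended difference: When len_colls is empty and the first bbox has negative x (so it 'overlaps' the [0,0,0,0] sentinel), A appends before its break check and returns the full gap list, while B returns [] — the intended truncation to the zero columns requested. — e.g. on wrong_columns([[-1, 0, 1, 2]], []): A returns [0], B returns []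
-- outside the precondition, e.g. on wrong_columns([[-1, 0, 5], [], [0, 0, 0]], [1]): A returns [0], B raises IndexError
import Mathlib
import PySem

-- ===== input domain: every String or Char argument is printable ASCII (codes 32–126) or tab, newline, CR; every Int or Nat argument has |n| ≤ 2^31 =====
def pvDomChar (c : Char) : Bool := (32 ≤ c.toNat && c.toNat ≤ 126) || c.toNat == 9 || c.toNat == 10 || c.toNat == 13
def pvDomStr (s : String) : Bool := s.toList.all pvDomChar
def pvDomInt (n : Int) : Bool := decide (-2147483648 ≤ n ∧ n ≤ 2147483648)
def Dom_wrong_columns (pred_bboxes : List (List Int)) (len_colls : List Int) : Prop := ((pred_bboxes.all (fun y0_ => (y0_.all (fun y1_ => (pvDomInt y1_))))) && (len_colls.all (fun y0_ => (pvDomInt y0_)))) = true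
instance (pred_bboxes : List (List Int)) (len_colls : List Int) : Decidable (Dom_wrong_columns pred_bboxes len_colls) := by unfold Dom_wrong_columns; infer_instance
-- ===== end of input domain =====

-- B re-decomposes A's stateful break-loop into collect-positions / truncate / difference phases
-- (alternative decomposition, same cost); on empty len_colls with a negative-x first bbox it
-- returns the intended [] where A returns the full gap list (see D_wrong_columns).

-- ===== PORT A =====
-- loop over zip(pred_bboxes, [[0,0,0,0]]+pred_bboxes) with acc / count state and the break
def wcLoopA (target : Nat) : List (List Int × List Int) → List Int → Int → List Int
  | [], acc, _ => acc
  | (later, front) :: rest, acc, count =>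
    let p := ((PySem.List.pyGet? front 2).getD 0 > (PySem.List.pyGet? later 0).getD 0)
    let acc' := if p then acc ++ [count] else acc
    let count' : Int := if p then 0 else count
    if acc'.length = target then acc'
    else wcLoopA target rest acc' (count' + 1)

def wrong_columns (pred_bboxes : List (List Int)) (len_colls : List Int) : List Int :=
  wcLoopA len_colls.length (pred_bboxes.zip (([0,0,0,0] : List Int) :: pred_bboxes)) [] 0

-- ===== PORT B =====
-- first loop of Source B: indices i where prev_box[2] > box[0], walking prev_box along
def altPos (prev : List Int) (i : Int) : List (List Int) → List Int
  | [] => []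
  | b :: rest =>
    if ((PySem.List.pyGet? prev 2).getD 0 > (PySem.List.pyGet? b 0).getD 0)
    then i :: altPos b (i + 1) rest
    else altPos b (i + 1) rest

-- second loop of Source B: successive differences against a running previous position
def altGaps (prev : Int) : List Int → List Int
  | [] => []
  | p :: rest => (p - prev) :: altGaps p rest

def wrong_columns_alt (pred_bboxes : List (List Int)) (len_colls : List Int) : List Int :=
  altGaps 0 ((altPos ([0,0,0,0] : List Int) 0 pred_bboxes).take len_colls.length)

-- ===== PRECONDITION & SPEC =====
-- Pre_ excludes the bbox shapes on which B (and, unless its break fires first, A) raises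
-- IndexError: every bbox needs an element 0 and every non-last bbox an element 2; A can still
-- return on such inputs only via an early break, and those inputs are excluded (see cites).
def Pre_wrong_columns (pred_bboxes : List (List Int)) (_len_colls : List Int) : Prop :=
  (∀ b ∈ pred_bboxes, 1 ≤ b.length) ∧ (∀ b ∈ pred_bboxes.dropLast, 3 ≤ b.length)
instance (pred_bboxes : List (List Int)) (len_colls : List Int) : Decidable (Pre_wrong_columns pred_bboxes len_colls) := by unfold Pre_wrong_columns; infer_instance

def pvWitness_wrong_columns : List (List Int) × List Int := ([[0, 0, 5, 5], [2, 0, 9, 5], [3, 0, 12, 5]], [1, 2])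

-- When len_colls is empty and the first bbox has negative x (so it 'overlaps' the [0,0,0,0]
-- sentinel), A appends before its break check and returns the full gap list, while B returns
-- [] — the intended truncation to the zero columns requested.
def D_wrong_columns (pred_bboxes : List (List Int)) (len_colls : List Int) : Prop :=
  len_colls = [] ∧ (pred_bboxes.headD []).headD 0 < 0
instance (pred_bboxes : List (List Int)) (len_colls : List Int) : Decidable (D_wrong_columns pred_bboxes len_colls) := by unfold D_wrong_columns; infer_instance

def Spec_wrong_columns (pred_bboxes : List (List Int)) (len_colls : List Int) (out : List Int) : Prop := ¬ D_wrong_columns pred_bboxes len_colls → out = wrong_columns_alt pred_bboxes len_colls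
instance (pred_bboxes : List (List Int)) (len_colls : List Int) (out : List Int) : Decidable (Spec_wrong_columns pred_bboxes len_colls out) := by unfold Spec_wrong_columns; infer_instance

def pvDiffWitness_wrong_columns : List (List Int) × List Int := ([[-1, 0, 1, 2]], [])
def pvDiffWitnessOut_wrong_columns : (List Int) × (List Int) := ([0], [])

-- ===== CLAIM (what is proved, stated in full; the proofs are below) =====
def Claim_unchanged_wrong_columns : Prop := ∀ (pred_bboxes : List (List Int)) (len_colls : List Int), Dom_wrong_columns pred_bboxes len_colls → Pre_wrong_columns pred_bboxes len_colls → Spec_wrong_columns pred_bboxes len_colls (wrong_columns pred_bboxes len_colls)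
def Claim_changed_wrong_columns : Prop := Dom_wrong_columns (pvDiffWitness_wrong_columns.1) (pvDiffWitness_wrong_columns.2) ∧ Pre_wrong_columns (pvDiffWitness_wrong_columns.1) (pvDiffWitness_wrong_columns.2) ∧ D_wrong_columns (pvDiffWitness_wrong_columns.1) (pvDiffWitness_wrong_columns.2) ∧ wrong_columns (pvDiffWitness_wrong_columns.1) (pvDiffWitness_wrong_columns.2) = pvDiffWitnessOut_wrong_columns.1 ∧ wrong_columns_alt (pvDiffWitness_wrong_columns.1) (pvDiffWitness_wrong_columns.2) = pvDiffWitnessOut_wrong_columns.2 ∧ pvDiffWitnessOut_wrong_columns.1 ≠ pvDiffWitnessOut_wrong_columns.2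
def Claim_exact_wrong_columns : Prop := ∀ (pred_bboxes : List (List Int)) (len_colls : List Int), Dom_wrong_columns pred_bboxes len_colls → Pre_wrong_columns pred_bboxes len_colls → D_wrong_columns pred_bboxes len_colls → wrong_columns pred_bboxes len_colls ≠ wrong_columns_alt pred_bboxes len_colls

-- ===== LEMMAS AND PROOFS =====

-- shift lemma for altGaps is folded into the main invariant below via the index parameter

-- main invariant: A's loop on the zipped suffix equals acc ++ the differenced, truncated
-- positions of B's first phase, with the running offset i - count aligning the two counters
theorem wcLoopA_eq (pred : List (List Int)) : ∀ (front : List Int) (target : Nat)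
    (a : List Int) (c i : Int), a.length < target →
    wcLoopA target (pred.zip (front :: pred)) a c
      = a ++ altGaps (i - c) ((altPos front i pred).take (target - a.length)) := by
  induction pred with
  | nil => intro front target a c i _; simp [wcLoopA, altPos, altGaps]
  | cons b rest ih =>
    intro front target a c i hlt
    simp only [List.zip_cons_cons, wcLoopA, altPos]
    by_cases hp : ((PySem.List.pyGet? front 2).getD 0 > (PySem.List.pyGet? b 0).getD 0)
    · simp only [hp, if_true]
      by_cases hend : (a ++ [c]).length = target
      · simp only [hend, if_true]
        have ht : target - a.length = 1 := by simp at hend; omega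
        simp [ht, List.take, altGaps]
      · simp only [hend, if_false]
        have hlt' : (a ++ [c]).length < target := by simp at hend ⊢; omega
        rw [ih b target (a ++ [c]) (0 + 1) (i + 1) hlt']
        have ht : target - a.length = (target - (a ++ [c]).length) + 1 := by
          simp at hend ⊢; omega
        rw [ht]
        simp [List.take, altGaps, List.append_assoc]
    · simp only [hp, if_false]
      have hne : ¬ a.length = target := by omega
      simp only [hne, if_false]
      rw [ih b target a (c + 1) (i + 1) hlt]
      congr 2
      omega

-- A's loop never shrinks its accumulator, so from a nonempty acc it returns nonempty
theorem wcLoopA_ne_nil (target : Nat) : ∀ (L : List (List Int × List Int)) (a : List Int)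
    (c : Int), a ≠ [] → wcLoopA target L a c ≠ [] := by
  intro L
  induction L with
  | nil => intro a c ha; simpa [wcLoopA] using ha
  | cons x rest ih =>
    intro a c ha
    obtain ⟨later, front⟩ := x
    simp only [wcLoopA]
    by_cases hp : ((PySem.List.pyGet? front 2).getD 0 > (PySem.List.pyGet? later 0).getD 0)
    · simp only [hp, if_true]
      split
      · intro h; simp_all
      · exact ih _ _ (by simp_all)
    · simp only [hp, if_false]
      split
      · intro h; simp_all
      · exact ih _ _ ha

-- on Pre_, the first bbox's [0] read in A equals headD 0 used by D_
theorem head_pyGet (b : List Int) : (PySem.List.pyGet? b 0).getD 0 = b.headD 0 := by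
  cases b <;> simp [PySem.List.pyGet?, PySem.List.pyIdx?]

theorem wrong_columns_spec : Claim_unchanged_wrong_columns := by
  intro pred lc _ _ hnd
  unfold wrong_columns wrong_columns_alt
  rcases Nat.eq_zero_or_pos lc.length with h0 | hpos
  · -- target = 0: outside D_ the first pair cannot overlap, so A breaks at once with []
    have hlc : lc = [] := List.length_eq_zero_iff.mp h0
    cases pred with
    | nil => simp [wcLoopA, altPos, altGaps, h0]
    | cons b rest =>
      have hov : ¬ ((0 : Int) > (PySem.List.pyGet? b 0).getD 0) := by
        rw [head_pyGet]
        intro hneg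
        exact hnd ⟨hlc, by simpa using hneg⟩
      have hfront : (PySem.List.pyGet? ([0,0,0,0] : List Int) 2).getD 0 = (0 : Int) := by decide
      simp only [List.zip_cons_cons, wcLoopA, hfront, hov, if_false]
      simp [h0, altGaps]
  · rw [wcLoopA_eq pred ([0,0,0,0] : List Int) lc.length [] 0 0 (by simpa using hpos)]
    simp

theorem wrong_columns_changed : Claim_changed_wrong_columns := by
  unfold Claim_changed_wrong_columns; refine ⟨by decide, ?_, by decide, by decide, by decide, by decide⟩
  constructor <;> intro b hb <;> simp_all [pvDiffWitness_wrong_columns]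

theorem wrong_columns_tight : Claim_exact_wrong_columns := by
  intro pred lc _ _ hd
  obtain ⟨hlc, hneg⟩ := hd
  cases pred with
  | nil => simp at hneg
  | cons b rest =>
    subst hlc
    unfold wrong_columns wrong_columns_alt
    simp only [List.length_nil, List.take_zero, altGaps]
    simp only [List.zip_cons_cons, wcLoopA]
    have hov : ((PySem.List.pyGet? ([0,0,0,0] : List Int) 2).getD 0 > (PySem.List.pyGet? b 0).getD 0) := by
      rw [head_pyGet]
      simp_all [PySem.List.pyGet?, PySem.List.pyIdx?]
    simp only [hov, if_true, List.nil_append, List.length_cons, List.length_nil]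
    split
    · simp
    · exact wcLoopA_ne_nil _ _ _ _ (by simp)
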